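-- pv_equiv track=rewrite | github.com/rohmatariow/ErrorHound | src/testers/header_tester.py | _categorize_headers
-- ===== SOURCE A (Python) =====
-- def _categorize_headers(headers):
--     """
--     Categorize headers by priority
--
--     Returns:
--         Tuple of (critical, custom, standard) header lists
--     """
--     critical = []
--     custom = []
--     standard = []
--
--     critical_names = ['host', 'cookie', 'content-type', 'content-length', 'authorization']
--
--     for name, value in headers.items():
--         name_lower = name.lower()
--
--         if name_lower in critical_names:
--             critical.append((name, value))
--         elif name.startswith('X-') or name.startswith('Sec-'):
--             custom.append((name, value))
--         else:
--             standard.append((name, value))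
--
--     return critical, custom, standard
-- ===== SOURCE B (Python) =====
-- def _categorize_headers(headers):
--     """Categorize headers by priority (three-pass filtering decomposition)."""
--     critical_names = {'host', 'cookie', 'content-type', 'content-length', 'authorization'}
--
--     def is_critical(name):
--         return name.lower() in critical_names
--
--     def is_custom(name):
--         return not is_critical(name) and (name.startswith('X-') or name.startswith('Sec-'))
--
--     items = list(headers.items())
--     critical = [(n, v) for n, v in items if is_critical(n)]
--     custom = [(n, v) for n, v in items if is_custom(n)]
--     standard = [(n, v) for n, v in items if not is_critical(n) and not is_custom(n)]
--     return critical, custom, standard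
-- ===== Notes on version B (the rewrite author's own statement) =====
-- stated objective: alternative
-- what changed: Replaced the single accumulator loop with if/elif/else by three independent filtering passes over the items, each with an explicit predicate encoding the original precedence.
import Mathlib
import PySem

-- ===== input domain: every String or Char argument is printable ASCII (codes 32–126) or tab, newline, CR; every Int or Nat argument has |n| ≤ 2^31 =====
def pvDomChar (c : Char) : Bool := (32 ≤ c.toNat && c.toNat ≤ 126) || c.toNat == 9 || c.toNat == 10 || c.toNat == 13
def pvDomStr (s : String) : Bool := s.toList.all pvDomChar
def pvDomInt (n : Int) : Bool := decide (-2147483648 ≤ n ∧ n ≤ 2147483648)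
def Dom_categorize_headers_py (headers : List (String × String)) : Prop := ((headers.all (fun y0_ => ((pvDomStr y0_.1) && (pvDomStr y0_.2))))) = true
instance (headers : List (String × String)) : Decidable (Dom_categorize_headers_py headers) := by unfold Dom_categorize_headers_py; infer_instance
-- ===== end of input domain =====

-- B replaces A's single if/elif/else accumulator loop by three independent filtering passes
-- with explicit predicates (objective: alternative decomposition; same O(n) cost).

-- ===== PORT A =====
def pvCriticalNames : List String :=
  ["host", "cookie", "content-type", "content-length", "authorization"]

-- one step of A's loop: append the pair to the matching accumulator, same branch order
def pvStepA (acc : (List (String × String)) × (List (String × String)) × (List (String × String)))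
    (nv : String × String) :
    (List (String × String)) × (List (String × String)) × (List (String × String)) :=
  let (critical, custom, standard) := acc
  let name_lower := PySem.Str.lower nv.1
  if pvCriticalNames.contains name_lower then
    (critical ++ [nv], custom, standard)
  else if PySem.Str.startswith nv.1 "X-" || PySem.Str.startswith nv.1 "Sec-" then
    (critical, custom ++ [nv], standard)
  else
    (critical, custom, standard ++ [nv])

def categorize_headers_py (headers : List (String × String)) :
    (List (String × String)) × (List (String × String)) × (List (String × String)) :=
  headers.foldl pvStepA ([], [], [])

-- ===== PORT B =====
def pvIsCritical (name : String) : Bool :=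
  (PySem.Set.ofList ["host", "cookie", "content-type", "content-length", "authorization"]).contains
    (PySem.Str.lower name)

def pvIsCustom (name : String) : Bool :=
  !pvIsCritical name && (PySem.Str.startswith name "X-" || PySem.Str.startswith name "Sec-")

def categorize_headers_py_alt (headers : List (String × String)) :
    (List (String × String)) × (List (String × String)) × (List (String × String)) :=
  (headers.filter (fun nv => pvIsCritical nv.1),
   headers.filter (fun nv => pvIsCustom nv.1),
   headers.filter (fun nv => !pvIsCritical nv.1 && !pvIsCustom nv.1))

-- ===== PRECONDITION & SPEC =====
def Spec_categorize_headers_py (headers : List (String × String)) (out : (List (String × String)) × (List (String × String)) × (List (String × String))) : Prop := out = categorize_headers_py_alt headers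
instance (headers : List (String × String)) (out : (List (String × String)) × (List (String × String)) × (List (String × String))) : Decidable (Spec_categorize_headers_py headers out) := by unfold Spec_categorize_headers_py; infer_instance

-- ===== CLAIM (what is proved, stated in full; the proofs are below) =====
def Claim_equal_categorize_headers_py : Prop := ∀ (headers : List (String × String)), Dom_categorize_headers_py headers → Spec_categorize_headers_py headers (categorize_headers_py headers)

-- ===== LEMMAS AND PROOFS =====

theorem pvCritical_agree (name : String) :
    pvCriticalNames.contains (PySem.Str.lower name) = pvIsCritical name := by
  rfl

theorem pvFoldA_acc (headers : List (String × String))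
    (c₁ c₂ c₃ : List (String × String)) :
    headers.foldl pvStepA (c₁, c₂, c₃) =
      (c₁ ++ headers.filter (fun nv => pvIsCritical nv.1),
       c₂ ++ headers.filter (fun nv => pvIsCustom nv.1),
       c₃ ++ headers.filter (fun nv => !pvIsCritical nv.1 && !pvIsCustom nv.1)) := by
  induction headers generalizing c₁ c₂ c₃ with
  | nil => simp
  | cons nv tl ih =>
    simp only [List.foldl_cons, pvStepA, List.filter_cons]
    rw [pvCritical_agree nv.1]
    by_cases hcrit : pvIsCritical nv.1 = true
    · simp [hcrit, pvIsCustom, ih]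
    · simp only [Bool.not_eq_true] at hcrit
      by_cases hx : PySem.Chars.startswith nv.1.toList ['X', '-'] = true
      · simp [hcrit, hx, pvIsCustom, ih]
      · by_cases hs : PySem.Chars.startswith nv.1.toList ['S', 'e', 'c', '-'] = true
        · simp [hcrit, hx, hs, pvIsCustom, ih]
        · simp [hcrit, hx, hs, pvIsCustom, ih]

-- ===== VERDICT (by name: the statement is the Claim_ definition above) =====
theorem categorize_headers_py_spec : Claim_equal_categorize_headers_py := by
  intro headers _
  unfold Spec_categorize_headers_py categorize_headers_py categorize_headers_py_alt
  simp [pvFoldA_acc]
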